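-- pv_equiv track=rewrite | github.com/Nico-Oz-ops/ITS_Python | Esercizi_Vari/Collection_and_more/Esercizio_recap_16.py | parole_solo_vocali
-- ===== SOURCE A (Python) =====
-- def parole_solo_vocali(parole: list[str]) -> list[str]:
--     risultato = []
--
--     for parola in parole:
--         tutti_vocali = True
--         for carattere in parola:
--             if carattere not in "aeiouAEIOU":
--                 tutti_vocali = False
--                 break
--
--         if tutti_vocali:
--             risultato.append(parola)
--
--     return risultato
-- ===== SOURCE B (Python) =====
-- VOWELS = "aeiouAEIOU"
--
-- def parole_solo_vocali(parole: list[str]) -> list[str]: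
--     # a word consists only of vowels iff stripping vowels from both ends deletes it entirely
--     return [parola for parola in parole if parola.strip(VOWELS) == ""]
-- ===== Notes on version B (the rewrite author's own statement) =====
-- stated objective: idiomatic
-- what changed: Replaces the inner left-to-right character scan with flag and break by str.strip(vowels): stripping vowels from both ends yields the empty string exactly when the word is all vowels, so the test becomes a single strip-and-compare with no inner loop.
import Mathlib
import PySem

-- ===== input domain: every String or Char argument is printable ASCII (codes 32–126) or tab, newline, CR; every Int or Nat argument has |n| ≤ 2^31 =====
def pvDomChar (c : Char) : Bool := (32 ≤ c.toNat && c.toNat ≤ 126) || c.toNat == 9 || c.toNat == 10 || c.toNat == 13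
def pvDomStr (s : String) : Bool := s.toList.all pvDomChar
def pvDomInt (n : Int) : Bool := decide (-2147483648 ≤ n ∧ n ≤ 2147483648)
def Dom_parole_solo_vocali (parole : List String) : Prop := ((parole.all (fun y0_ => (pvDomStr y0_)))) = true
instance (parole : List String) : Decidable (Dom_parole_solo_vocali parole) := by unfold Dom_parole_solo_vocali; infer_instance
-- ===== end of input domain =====

-- B replaces A's inner flag-and-break scan by str.strip(vowels) == "": stripping vowels
-- from both ends deletes the word entirely iff it is all vowels (idiomatic; same value).

-- ===== PORT A =====
-- inner loop: 'tutti_vocali' flag with break at the first non-vowel character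
def pvInnerA : List Char → Bool
  | [] => true
  | c :: rest => if !("aeiouAEIOU".toList.contains c) then false else pvInnerA rest

def parole_solo_vocali (parole : List String) : List String :=
  parole.foldl (fun risultato parola =>
    if pvInnerA parola.toList then risultato ++ [parola] else risultato) []

-- ===== PORT B =====
def parole_solo_vocali_alt (parole : List String) : List String :=
  parole.filter (fun parola => PySem.Str.stripChars parola "aeiouAEIOU" == "")

-- ===== PRECONDITION & SPEC =====
def Spec_parole_solo_vocali (parole : List String) (out : List String) : Prop := out = parole_solo_vocali_alt parole
instance (parole : List String) (out : List String) : Decidable (Spec_parole_solo_vocali parole out) := by unfold Spec_parole_solo_vocali; infer_instance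

-- ===== CLAIM =====
def Claim_equal_parole_solo_vocali : Prop := ∀ (parole : List String), Dom_parole_solo_vocali parole → Spec_parole_solo_vocali parole (parole_solo_vocali parole)

-- ===== LEMMAS AND PROOFS =====

theorem pvInnerA_eq_all (l : List Char) :
    pvInnerA l = l.all (fun c => "aeiouAEIOU".toList.contains c) := by
  induction l with
  | nil => rfl
  | cons c rest ih =>
    rw [List.all_cons, ← ih]
    show (if !("aeiouAEIOU".toList.contains c) then false else pvInnerA rest) = _
    cases h : "aeiouAEIOU".toList.contains c <;> simp

-- stripping chars from both ends empties the list iff every element is one of those chars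
theorem pvStripChars_nil_iff (s chars : List Char) :
    PySem.Chars.stripChars s chars = [] ↔ ∀ x ∈ s, chars.contains x := by
  unfold PySem.Chars.stripChars
  simp only [List.reverse_eq_nil_iff, List.dropWhile_eq_nil_iff, List.mem_reverse]
  constructor
  · intro h x hx
    rcases List.mem_append.mp
        ((List.takeWhile_append_dropWhile (p := fun c => chars.contains c) (l := s)) ▸ hx) with h1 | h1
    · exact List.mem_takeWhile_imp h1
    · exact h x h1
  · intro h x hx
    exact h x (List.dropWhile_sublist _ |>.mem hx)

theorem pvTest_eq (p : String) :
    pvInnerA p.toList = (PySem.Str.stripChars p "aeiouAEIOU" == "") := by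
  rw [pvInnerA_eq_all, Bool.eq_iff_iff, List.all_eq_true, beq_iff_eq,
    ← String.toList_inj, PySem.Str.toList_stripChars]
  simpa using (pvStripChars_nil_iff p.toList "aeiouAEIOU".toList).symm

-- ===== VERDICT =====
theorem parole_solo_vocali_spec : Claim_equal_parole_solo_vocali := by
  intro parole _
  unfold Spec_parole_solo_vocali parole_solo_vocali parole_solo_vocali_alt
  have hfun : (fun (risultato : List String) parola =>
      if pvInnerA parola.toList then risultato ++ [parola] else risultato)
      = (fun risultato parola =>
      if PySem.Str.stripChars parola "aeiouAEIOU" == "" then risultato ++ [parola] else risultato) := by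
    funext r p; rw [pvTest_eq]
  rw [hfun, PySem.List.foldl_append_if_eq_filter]
  simp
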